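-- pv_equiv track=rewrite | github.com/bxuecarnegie/bmc_loci | uniprot_to_fa_annotated.py | get_pfam
-- ===== SOURCE A (Python) =====
-- def parse_uniprot_cross_ref(uniprot_cr_tag, resource_abbr, indices=None):
--     cross_ref_list = []
--     for cr in uniprot_cr_tag:
--         if cr[0].lower() == resource_abbr.lower():
--             try:
--                 if indices is None:
--                     cross_ref_list.append(cr[1:])
--                 else:
--                     cross_ref_list.append([r for idx, r in enumerate(cr) if idx in indices])
--             except IndexError:
--                 continue
--     return cross_ref_list
--
-- def get_pfam(uniprot_cr_tag):
--     pfam_list = parse_uniprot_cross_ref(uniprot_cr_tag, "Pfam")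
--     if len(pfam_list) == 0:
--         pfam_str = "#"
--     else:
--         pfam_str = ""
--         for pf in pfam_list:
--             try:
--                 pfam_str += pf[0].lower()
--             except IndexError:
--                 continue
--     return pfam_str
-- ===== SOURCE B (Python) =====
-- def get_pfam(uniprot_cr_tag):
--     pfam_str = ""
--     matched = False
--     for cr in uniprot_cr_tag:
--         if cr[0].lower() == "pfam":
--             matched = True
--             if len(cr) > 1:
--                 pfam_str += cr[1].lower()
--     return pfam_str if matched else "#"
-- ===== Notes on version B (the rewrite author's own statement) =====
-- stated objective: simpler
-- what changed: Fuses A's two-stage pipeline (build an intermediate list of tail-slices via a generic cross-ref parser, then fold it into a string) into one direct pass over the input that keeps a matched flag and appends cr[1].lower() when present, with no intermediate list and no helper function.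
import Mathlib
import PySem

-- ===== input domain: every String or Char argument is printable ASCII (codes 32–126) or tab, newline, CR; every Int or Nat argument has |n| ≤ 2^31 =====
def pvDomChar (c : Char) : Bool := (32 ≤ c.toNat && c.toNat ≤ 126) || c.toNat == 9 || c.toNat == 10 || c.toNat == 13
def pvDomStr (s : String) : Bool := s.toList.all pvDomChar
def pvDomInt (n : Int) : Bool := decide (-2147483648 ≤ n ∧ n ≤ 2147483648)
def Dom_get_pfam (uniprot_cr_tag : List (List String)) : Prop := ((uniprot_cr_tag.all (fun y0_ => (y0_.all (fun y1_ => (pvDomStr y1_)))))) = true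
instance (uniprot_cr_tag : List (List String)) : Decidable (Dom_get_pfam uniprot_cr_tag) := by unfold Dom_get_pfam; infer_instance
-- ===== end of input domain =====

-- B fuses A's build-list-then-fold pipeline into one pass with a matched flag; return values
-- only (no mutation). Strings are accumulated as List Char and packed with String.ofList at the
-- end (Lean's String.append is opaque to the kernel), which is exact for Python's str +=.

-- ===== PORT A =====
-- helper: parse_uniprot_cross_ref with indices=None (the only way get_pfam calls it)
def parse_uniprot_cross_ref (uniprot_cr_tag : List (List String)) (resource_abbr : String) : List (List String) :=
  uniprot_cr_tag.foldl (fun cross_ref_list cr =>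
    -- cr[0] raises IndexError on empty cr in Python: excluded by Pre_get_pfam
    if PySem.Chars.lower (((PySem.List.pyGet? cr 0).getD "").toList)
        = PySem.Chars.lower resource_abbr.toList then
      cross_ref_list ++ [PySem.List.slice cr (some 1) none]   -- cr[1:]
    else cross_ref_list) []

def get_pfam (uniprot_cr_tag : List (List String)) : String :=
  let pfam_list := parse_uniprot_cross_ref uniprot_cr_tag "Pfam"
  if pfam_list.length = 0 then "#"
  else String.ofList (pfam_list.foldl (fun pfam_str pf =>
    match PySem.List.pyGet? pf 0 with      -- pf[0]; IndexError is caught -> continue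
    | none => pfam_str
    | some x => pfam_str ++ PySem.Chars.lower x.toList) [])

-- ===== PORT B =====
def get_pfam_alt (uniprot_cr_tag : List (List String)) : String :=
  let r := uniprot_cr_tag.foldl (fun (acc : List Char × Bool) cr =>
    -- cr[0] raises IndexError on empty cr in Python: excluded by Pre_get_pfam
    if PySem.Chars.lower (((PySem.List.pyGet? cr 0).getD "").toList) = "pfam".toList then
      ((if 1 < cr.length then
          acc.1 ++ PySem.Chars.lower (((PySem.List.pyGet? cr 1).getD "").toList)
        else acc.1), true)
    else acc) ([], false)
  if r.2 then String.ofList r.1 else "#"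

-- ===== PRECONDITION & SPEC =====
-- Pre_ excludes inputs containing an empty inner list: there Python A (and B) raises IndexError on cr[0].
def Pre_get_pfam (uniprot_cr_tag : List (List String)) : Prop :=
  ∀ cr ∈ uniprot_cr_tag, cr ≠ []
instance (uniprot_cr_tag : List (List String)) : Decidable (Pre_get_pfam uniprot_cr_tag) := by unfold Pre_get_pfam; infer_instance

def pvWitness_get_pfam : List (List String) := [["Pfam", "PF00001", "x"], ["EMBL", "e1"], ["pfam"], ["PFAM", "PF2"]]

def Spec_get_pfam (uniprot_cr_tag : List (List String)) (out : String) : Prop := out = get_pfam_alt uniprot_cr_tag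
instance (uniprot_cr_tag : List (List String)) (out : String) : Decidable (Spec_get_pfam uniprot_cr_tag out) := by unfold Spec_get_pfam; infer_instance

-- ===== CLAIM (what is proved, stated in full; the proofs are below) =====
def Claim_equal_get_pfam : Prop := ∀ (uniprot_cr_tag : List (List String)), Dom_get_pfam uniprot_cr_tag → Pre_get_pfam uniprot_cr_tag → Spec_get_pfam uniprot_cr_tag (get_pfam uniprot_cr_tag)

-- ===== LEMMAS AND PROOFS =====

-- Bool predicate shared by the two characterisations
def pfamP (cr : List String) : Bool :=
  decide (PySem.Chars.lower (((PySem.List.pyGet? cr 0).getD "").toList) = "pfam".toList)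

-- chars contributed by one matching cross reference
def pfamG (cr : List String) : List Char :=
  if 1 < cr.length then PySem.Chars.lower (((PySem.List.pyGet? cr 1).getD "").toList) else []

theorem lower_Pfam : PySem.Chars.lower "Pfam".toList = "pfam".toList := by decide

theorem parse_char (l : List (List String)) :
    parse_uniprot_cross_ref l "Pfam"
      = (l.filter pfamP).map (fun cr => PySem.List.slice cr (some 1) none) := by
  unfold parse_uniprot_cross_ref
  rw [PySem.List.foldl_append_ite]
  simp only [List.nil_append, lower_Pfam]
  rfl

theorem g_of_tail (s : List Char) (cr : List String) :
    (match PySem.List.pyGet? (PySem.List.slice cr (some 1) none) 0 with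
      | none => s
      | some x => s ++ PySem.Chars.lower x.toList) = s ++ pfamG cr := by
  rw [PySem.List.slice_from_one]
  match cr with
  | [] => simp [pfamG, PySem.List.pyGet?]
  | [a] => simp [pfamG, PySem.List.pyGet?]
  | a :: b :: rest =>
      simp [pfamG, PySem.List.pyGet?, PySem.List.pyIdx?]

theorem A_char (l : List (List String)) :
    get_pfam l = if (l.filter pfamP) = [] then "#"
                 else String.ofList ((l.filter pfamP).flatMap pfamG) := by
  unfold get_pfam
  rw [parse_char]
  by_cases h : l.filter pfamP = []
  · simp [h]
  · simp only [List.length_map, List.length_eq_zero_iff, h, if_false]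
    rw [List.foldl_map]
    have : ∀ (s : List Char) (cr : List String),
        (match PySem.List.pyGet? (PySem.List.slice cr (some 1) none) 0 with
          | none => s
          | some x => s ++ PySem.Chars.lower x.toList) = s ++ pfamG cr := g_of_tail
    simp only [this]
    rw [PySem.List.foldl_append_eq_flatMap]
    simp

theorem B_fold (l : List (List String)) (s : List Char) (m : Bool) :
    l.foldl (fun (acc : List Char × Bool) cr =>
      if PySem.Chars.lower (((PySem.List.pyGet? cr 0).getD "").toList) = "pfam".toList then
        ((if 1 < cr.length then
            acc.1 ++ PySem.Chars.lower (((PySem.List.pyGet? cr 1).getD "").toList)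
          else acc.1), true)
      else acc) (s, m)
    = (s ++ (l.filter pfamP).flatMap pfamG, m || !(l.filter pfamP).isEmpty) := by
  induction l generalizing s m with
  | nil => simp
  | cons cr rest ih =>
      by_cases h : PySem.Chars.lower (((PySem.List.pyGet? cr 0).getD "").toList) = "pfam".toList
      · simp only [List.foldl_cons, if_pos h]
        rw [ih]
        have hp : pfamP cr = true := by unfold pfamP; exact decide_eq_true h
        by_cases hl : 1 < cr.length <;>
          simp [hp, pfamG, hl, List.append_assoc]
      · have hp : pfamP cr = false := by unfold pfamP; exact decide_eq_false h
        simp only [List.foldl_cons, if_neg h]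
        rw [ih]
        simp [hp]

theorem B_char (l : List (List String)) :
    get_pfam_alt l = if (l.filter pfamP) = [] then "#"
                     else String.ofList ((l.filter pfamP).flatMap pfamG) := by
  unfold get_pfam_alt
  rw [B_fold]
  by_cases h : l.filter pfamP = [] <;> simp [h]

-- ===== VERDICT (by name: the statement is the Claim_ definition above) =====
theorem get_pfam_spec : Claim_equal_get_pfam := by
  intro l _ _
  unfold Spec_get_pfam
  rw [A_char, B_char]
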